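-- pv_equiv track=rewrite | github.com/AlexanderRDiaz/siena-coding-comp | src/2025/green/seventh.py | convertNots
-- ===== SOURCE A (Python) =====
-- def convertNots(expression):
--     i = 1
--     while i < len(expression):
--         if expression[i] == "'":
--             if i < 2:
--                 expression = 'not ' + expression[i - 1] + expression[i + 1 :]
--             else:
--                 expression = expression[: i - 1] + 'not ' + expression[i - 1] + expression[i + 1 :]
--             i += 4
--         i += 1
--     return expression
-- ===== SOURCE B (Python) =====
-- import re
--
-- def convertNots(expression):
--     return re.sub(r"(.)'", r"not \1", expression, flags=re.DOTALL)
-- ===== Notes on version B (the rewrite author's own statement) =====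
-- stated objective: faster
-- what changed: Replaced the manual index-tracking while-loop that re-slices and re-concatenates the whole string on every rewrite by a single non-overlapping regex substitution (any character followed by an apostrophe becomes the word not, a space and that character), done in one linear pass by the regex engine with DOTALL so newline is matched too.
import Mathlib
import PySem

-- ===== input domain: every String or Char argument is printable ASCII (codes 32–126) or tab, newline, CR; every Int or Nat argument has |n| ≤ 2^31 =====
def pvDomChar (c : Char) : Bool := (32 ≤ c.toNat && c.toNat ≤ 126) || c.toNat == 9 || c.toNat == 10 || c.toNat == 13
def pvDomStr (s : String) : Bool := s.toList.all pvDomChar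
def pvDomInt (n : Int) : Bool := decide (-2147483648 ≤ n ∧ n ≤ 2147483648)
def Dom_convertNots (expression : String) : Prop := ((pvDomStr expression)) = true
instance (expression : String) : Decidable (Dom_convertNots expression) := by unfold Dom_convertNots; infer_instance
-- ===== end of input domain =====

-- B replaces A's index-tracking while-loop and string re-splicing by one regex substitution (idiomatic).

-- ===== PORT A =====
-- A's while-loop: index i over a string that is spliced in place; all slice indices are
-- nonnegative (i ≥ 1 throughout), so expression[:i-1] = take (i-1), expression[i+1:] = drop (i+1),
-- expression[i-1] = the character at i-1 — exact on that domain.  The fuel argument is only a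
-- structural totality guard: the loop measure length-i strictly decreases each iteration, and
-- fuel = length bounds it (loopA_eq proves the result for every sufficient fuel), so the loop
-- never runs out of fuel before the while-condition fails.
def convertNotsLoopA : Nat → List Char → Nat → List Char
  | 0, e, _ => e
  | f+1, e, i =>
    if h : i < e.length then
      if e[i] = '\'' then
        if i < 2 then
          convertNotsLoopA f (['n','o','t',' '] ++ e[i-1]'(by omega) :: e.drop (i+1)) (i+5)
        else
          convertNotsLoopA f (e.take (i-1) ++ ['n','o','t',' '] ++ e[i-1]'(by omega) :: e.drop (i+1)) (i+5)
      else convertNotsLoopA f e (i+1)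
    else e

def convertNots (expression : String) : String :=
  String.ofList (convertNotsLoopA expression.toList.length expression.toList 1)

-- ===== PORT B =====
-- Source B's re.sub(r"(.)'", r"not \1", s, flags=re.DOTALL): left-to-right non-overlapping
-- replacement of any character followed by an apostrophe, ported by hand as the exact
-- scan the regex engine performs (DOTALL: the captured char may be any char incl. '\n').
def convertNotsSub : List Char → List Char
  | [] => []
  | [c] => [c]
  | c :: d :: rest =>
      if d = '\'' then 'n' :: 'o' :: 't' :: ' ' :: c :: convertNotsSub rest
      else c :: convertNotsSub (d :: rest)

def convertNots_alt (expression : String) : String :=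
  String.ofList (convertNotsSub expression.toList)

-- ===== PRECONDITION & SPEC =====
def Spec_convertNots (expression : String) (out : String) : Prop := out = convertNots_alt expression
instance (expression : String) (out : String) : Decidable (Spec_convertNots expression out) := by unfold Spec_convertNots; infer_instance

-- ===== CLAIM (what is proved, stated in full; the proofs are below) =====
def Claim_equal_convertNots : Prop := ∀ (expression : String), Dom_convertNots expression → Spec_convertNots expression (convertNots expression)

-- ===== LEMMAS AND PROOFS =====

-- subNot is the identity on lists of length ≤ 1
lemma convertNotsSub_short (d : List Char) (hd : d.length ≤ 1) : convertNotsSub d = d := by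
  match d with
  | [] => rfl
  | [c] => rfl
  | a :: b :: t => simp at hd

-- loop invariant: the processed prefix is final output, the rest is rewritten by subNot
lemma loopA_eq (n : Nat) : ∀ (e : List Char) (j : Nat), e.length - j ≤ n →
    convertNotsLoopA n e (j+1) = e.take j ++ convertNotsSub (e.drop j) := by
  induction n with
  | zero =>
    intro e j h
    have hle : e.length ≤ j := by omega
    rw [show convertNotsLoopA 0 e (j+1) = e from rfl]
    rw [List.take_of_length_le hle, List.drop_eq_nil_of_le hle]
    rw [show convertNotsSub [] = [] from rfl, List.append_nil]
  | succ n ih =>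
    intro e j h
    simp only [convertNotsLoopA]
    by_cases hlt : j + 1 < e.length
    · simp only [dif_pos hlt, Nat.add_sub_cancel, show j+1+1 = j+2 from rfl]
      have hj : j < e.length := by omega
      have hdj : e.drop j = e[j] :: e.drop (j+1) := List.drop_eq_getElem_cons hj
      have hdj1 : e.drop (j+1) = e[j+1] :: e.drop (j+2) := List.drop_eq_getElem_cons hlt
      by_cases hq : e[j+1] = '\''
      · simp only [if_pos hq]
        by_cases hj2 : j + 1 < 2
        · -- j = 0
          have hj0 : j = 0 := by omega
          subst hj0
          simp only [if_pos hj2]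
          have hIH := ih (['n','o','t',' '] ++ e[0] :: e.drop 2) 5 (by simp; omega)
          rw [show (1:Nat) + 5 = 5 + 1 from rfl, hIH]
          simp [hdj, hdj1, convertNotsSub, hq]
        · simp only [if_neg hj2]
          set e' := e.take j ++ ['n','o','t',' '] ++ e[j] :: e.drop (j+2) with he'
          have hlen : (e.take j).length = j := by simp; omega
          have hlen' : e'.length = e.length + 3 := by simp [he']; omega
          have hIH := ih e' (j+5) (by omega)
          rw [show j + 1 + 5 = (j + 5) + 1 from rfl, hIH]
          have htk : e'.take (j+5) = e.take j ++ ['n','o','t',' '] ++ [e[j]] := by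
            simp [he', List.take_append, hlen]
          have hdr : e'.drop (j+5) = e.drop (j+2) := by
            simp [he', List.drop_append, hlen]
          rw [htk, hdr, hdj, hdj1]
          simp [convertNotsSub, hq]
      · simp only [if_neg hq]
        rw [ih e (j+1) (by omega), hdj, hdj1]
        rw [show convertNotsSub (e[j] :: e[j+1] :: e.drop (j+2)) =
              if e[j+1] = '\'' then 'n' :: 'o' :: 't' :: ' ' :: e[j] :: convertNotsSub (e.drop (j+2))
              else e[j] :: convertNotsSub (e[j+1] :: e.drop (j+2)) from rfl]
        rw [if_neg hq, ← hdj1]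
        have ht : List.take (j+1) e = List.take j e ++ [e[j]] := by
          rw [List.take_add_one, List.getElem?_eq_getElem hj]
          rfl
        rw [ht, List.append_assoc]
        rfl
    · simp only [dif_neg hlt]
      rw [convertNotsSub_short (e.drop j) (by simp; omega)]
      simp [List.take_append_drop]

-- ===== VERDICT (by name: the statement is the Claim_ definition above) =====
theorem convertNots_spec : Claim_equal_convertNots := by
  intro s _
  unfold Spec_convertNots convertNots convertNots_alt
  rw [loopA_eq (s.toList.length) s.toList 0 (by omega)]
  simp
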